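-- pv_equiv track=rewrite | github.com/ICAI-IMAT-NLP1/p4-skip-gram-Asfaloth25 | src/data_processing.py | create_lookup_tables
-- ===== SOURCE A (Python) =====
-- from typing import List, Tuple, Dict, Generator
-- from collections import Counter
--
-- def create_lookup_tables(words: List[str]) -> Tuple[Dict[str, int], Dict[int, str]]:
--     """
--     Create lookup tables for vocabulary.
--
--     Args:
--         words: A list of words from which to create vocabulary.
--
--     Returns:
--         A tuple containing two dictionaries. The first dictionary maps words to integers (vocab_to_int),
--         and the second maps integers to words (int_to_vocab).
--     """
--     # TODO
--     word_counts: Counter = Counter(words)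
--     # Sorting the words from most to least frequent in text occurrence.
--
--     sort_func = lambda val, d: (d[val], val)
--     # changed the typing for convenience
--     sorted_vocab: List[Tuple[int, str]] = [
--         sort_func(val, word_counts) for val in word_counts
--     ]
--
--     # Create int_to_vocab and vocab_to_int dictionaries.
--     int_to_vocab: Dict[int, str] = {
--         i: val[1] for i, val in enumerate(sorted_vocab)
--     }
--     vocab_to_int: Dict[str, int] = {
--         int_to_vocab[k]: k for k in int_to_vocab
--     }
--
--     return vocab_to_int, int_to_vocab
-- ===== SOURCE B (Python) =====
-- from typing import List, Tuple, Dict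
--
--
-- def create_lookup_tables(words: List[str]) -> Tuple[Dict[str, int], Dict[int, str]]:
--     """Backward overwrite pass records each word's FIRST occurrence index
--     (later, i.e. smaller, indices overwrite earlier ones), then an explicit
--     sort by that index yields the vocabulary order."""
--     first_pos: Dict[str, int] = {}
--     for i, w in reversed(list(enumerate(words))):
--         first_pos[w] = i
--     pairs = sorted(first_pos.items(), key=lambda p: p[1])
--     vocab = [w for w, _ in pairs]
--     int_to_vocab: Dict[int, str] = dict(enumerate(vocab))
--     vocab_to_int: Dict[str, int] = {w: i for i, w in enumerate(vocab)}
--     return vocab_to_int, int_to_vocab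
-- ===== Notes on version B (the rewrite author's own statement) =====
-- stated objective: alternative
-- what changed: Replaces A's Counter pipeline (count all words, enumerate the counter's insertion-ordered keys, invert) with a backward overwrite pass that records each word's first occurrence index, followed by an explicit sort of the (word, first-index) pairs by that index; the vocabulary order comes from sorting recorded positions, not from dict insertion order.
import Mathlib
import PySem

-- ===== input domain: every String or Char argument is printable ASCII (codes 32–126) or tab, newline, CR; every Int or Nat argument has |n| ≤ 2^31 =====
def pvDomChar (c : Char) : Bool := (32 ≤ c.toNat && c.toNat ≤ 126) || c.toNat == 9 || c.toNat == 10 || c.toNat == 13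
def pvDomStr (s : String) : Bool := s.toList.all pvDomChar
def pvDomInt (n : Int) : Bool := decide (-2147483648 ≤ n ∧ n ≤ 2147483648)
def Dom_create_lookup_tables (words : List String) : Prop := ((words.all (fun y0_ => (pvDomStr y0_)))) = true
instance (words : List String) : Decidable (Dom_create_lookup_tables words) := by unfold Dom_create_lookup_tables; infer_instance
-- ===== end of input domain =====

-- B replaces A's Counter pipeline with a backward pass recording first-occurrence indices plus an explicit sort by that index (alternative decomposition; same results).


-- ===== PORT A =====
def create_lookup_tables (words : List String) : (List (String × Int)) × (List (Int × String)) :=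
  let word_counts : PySem.Dict String Int := PySem.Dict.counter words
  -- d[val] with val iterating word_counts's own keys: the key is always present, so getD is exact here
  let sorted_vocab : List (Int × String) :=
    word_counts.keys.map (fun val => (word_counts.getD val 0, val))
  let int_to_vocab : PySem.Dict Int String :=
    PySem.Dict.ofList ((PySem.List.enumerate sorted_vocab).map (fun p => (p.1, p.2.2)))
  -- int_to_vocab[k] with k iterating int_to_vocab's own keys: the key is always present, so getD is exact here
  let vocab_to_int : PySem.Dict String Int :=
    PySem.Dict.ofList (int_to_vocab.keys.map (fun k => (int_to_vocab.getD k "", k)))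
  (vocab_to_int.items, int_to_vocab.items)

-- ===== PORT B =====
def create_lookup_tables_alt (words : List String) : (List (String × Int)) × (List (Int × String)) :=
  -- for i, w in reversed(list(enumerate(words))): first_pos[w] = i
  let first_pos : PySem.Dict String Int :=
    (PySem.List.enumerate words).reverse.foldl (fun d p => d.insert p.2 p.1) PySem.Dict.empty
  -- pairs = sorted(first_pos.items(), key=lambda p: p[1])
  let pairs : List (String × Int) := PySem.List.sorted first_pos.items (fun p => p.2) false
  let vocab : List String := pairs.map (fun p => p.1)
  let int_to_vocab : PySem.Dict Int String := PySem.Dict.ofList (PySem.List.enumerate vocab)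
  let vocab_to_int : PySem.Dict String Int :=
    PySem.Dict.ofList ((PySem.List.enumerate vocab).map (fun q => (q.2, q.1)))
  (vocab_to_int.items, int_to_vocab.items)

-- ===== PRECONDITION & SPEC =====
def Spec_create_lookup_tables (words : List String) (out : (List (String × Int)) × (List (Int × String))) : Prop := out = create_lookup_tables_alt words
instance (words : List String) (out : (List (String × Int)) × (List (Int × String))) : Decidable (Spec_create_lookup_tables words out) := by unfold Spec_create_lookup_tables; infer_instance

-- ===== CLAIM (what is proved, stated in full; the proofs are below) =====
def Claim_equal_create_lookup_tables : Prop := ∀ (words : List String), Dom_create_lookup_tables words → Spec_create_lookup_tables words (create_lookup_tables words)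

-- ===== LEMMAS AND PROOFS =====

theorem pvEnum_snd {α : Type} (l : List α) (k : Int) :
    (PySem.List.enumerate l k).map Prod.snd = l := by
  induction l generalizing k with
  | nil => rfl
  | cons x t ih => simp [PySem.List.enumerate_cons, ih]

theorem pvEnum_fst_lt {α : Type} (l : List α) (k : Int) :
    ∀ p ∈ PySem.List.enumerate l k, k ≤ p.1 := by
  induction l generalizing k with
  | nil => simp [PySem.List.enumerate_nil]
  | cons x t ih =>
    intro p hp
    rw [PySem.List.enumerate_cons] at hp
    rcases List.mem_cons.1 hp with h | h
    · simp [h]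
    · have := ih (k + 1) p h; omega

theorem pvEnum_fst_nodup {α : Type} (l : List α) (k : Int) :
    ((PySem.List.enumerate l k).map Prod.fst).Nodup := by
  induction l generalizing k with
  | nil => simp [PySem.List.enumerate_nil]
  | cons x t ih =>
    rw [PySem.List.enumerate_cons]
    simp only [List.map_cons, List.nodup_cons]
    refine ⟨?_, ih (k + 1)⟩
    intro hmem
    rcases List.mem_map.1 hmem with ⟨p, hp, hk⟩
    have := pvEnum_fst_lt t (k + 1) p hp
    omega

theorem pvEnum_map_pair {α β : Type} (g : α → β) (l : List α) (k : Int) :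
    (PySem.List.enumerate (l.map (fun v => (g v, v))) k).map (fun p => (p.1, p.2.2)) =
      PySem.List.enumerate l k := by
  induction l generalizing k with
  | nil => rfl
  | cons x t ih => simp [PySem.List.enumerate_cons, ih]

-- ofList on a list with distinct keys keeps it as the items list
theorem pvItems_ofList {κ ν : Type} [BEq κ] [LawfulBEq κ] (L : List (κ × ν))
    (h : (L.map Prod.fst).Nodup) : (PySem.Dict.ofList L).items = L := by
  have := PySem.Dict.items_foldl_insert_fresh L Prod.fst Prod.snd PySem.Dict.empty
    (by intro a _; simp [PySem.Dict.contains_empty]) h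
  simpa [PySem.Dict.ofList, PySem.Dict.update] using this

theorem pvFind_append {α : Type} (p : α → Bool) (l1 l2 : List α) :
    (l1 ++ l2).find? p = ((l1.find? p).orElse (fun _ => l2.find? p)) := by
  induction l1 with
  | nil => simp
  | cons a t ih =>
    cases ha : p a with
    | true => simp [ha]
    | false => simp [ha, ih]

-- the final lookup of an insert-loop over (value, key) pairs is the LAST pair with that key
theorem pvGetFold (l : List (Int × String)) : ∀ (d : PySem.Dict String Int) (w : String),
    (l.foldl (fun d p => d.insert p.2 p.1) d).get? w =
      match l.reverse.find? (fun q => q.2 == w) with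
      | some q => some q.1
      | none => d.get? w := by
  induction l with
  | nil => intro d w; simp
  | cons p t ih =>
    intro d w
    rw [List.foldl_cons, ih, List.reverse_cons, pvFind_append]
    cases hf : t.reverse.find? (fun q => q.2 == w) with
    | some q => simp
    | none =>
      rw [PySem.Dict.get?_insert]
      by_cases hw : w = p.2
      · subst hw
        simp
      · have hne : (p.2 == w) = false := by
          simp only [beq_eq_false_iff_ne, ne_eq]
          exact fun he => hw he.symm
        simp [hne, hw]

-- find? over an enumeration locates the first occurrence index
theorem pvFindEnum (ws : List String) : ∀ (k : Int) (w : String), w ∈ ws →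
    (PySem.List.enumerate ws k).find? (fun q => q.2 == w) = some (k + (ws.idxOf w : Int), w) := by
  induction ws with
  | nil => intro _ _ h; simp at h
  | cons x t ih =>
    intro k w hmem
    rw [PySem.List.enumerate_cons]
    by_cases hx : x = w
    · subst hx
      simp [List.idxOf_cons_self]
    · have hxw : (x == w) = false := by simpa using hx
      have hwt : w ∈ t := by
        rcases List.mem_cons.1 hmem with h | h
        · exact absurd h.symm hx
        · exact h
      rw [List.find?_cons]
      simp only [hxw]
      rw [ih (k + 1) w hwt, List.idxOf_cons_ne _ (by simpa using hx)]
      have harith : k + 1 + (t.idxOf w : Int) = k + ((t.idxOf w + 1 : Nat) : Int) := by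
        push_cast; ring
      rw [harith]

theorem pvIdx_append_not_mem (l : List String) (x : String) (h : x ∉ l) :
    (l ++ [x]).idxOf x = l.length := by
  induction l with
  | nil => simp [List.idxOf_cons_self]
  | cons a t ih =>
    have hxa : x ≠ a := by intro he; exact h (by simp [he])
    have hxt : x ∉ t := fun hm => h (List.mem_cons_of_mem _ hm)
    rw [List.cons_append, List.idxOf_cons_ne _ (by simpa using fun he => hxa he.symm), ih hxt,
      List.length_cons]

theorem pvS_append (ws : List String) (x : String) :
    PySem.Set.ofList (ws ++ [x]) =
      if x ∈ ws then PySem.Set.ofList ws else PySem.Set.ofList ws ++ [x] := by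
  rw [PySem.Set.ofList_eq_foldl, List.foldl_append]
  show PySem.Set.add (PySem.Set.ofList ws) x = _
  unfold PySem.Set.add
  by_cases h : x ∈ ws
  · have : x ∈ PySem.Set.ofList ws := (PySem.Set.mem_ofList _ _).2 h
    simp [this, h]
  · have : x ∉ PySem.Set.ofList ws := fun hm => h ((PySem.Set.mem_ofList _ _).1 hm)
    simp [this, h]

-- along the first-occurrence distinct list, first-occurrence indices strictly increase
theorem pvPairwiseIdx (ws : List String) :
    (PySem.Set.ofList ws).Pairwise (fun a b => ((ws.idxOf a : Int) < (ws.idxOf b : Int))) := by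
  induction ws using List.reverseRecOn with
  | nil => simp [PySem.Set.ofList]
  | append_singleton t x ih =>
    rw [pvS_append]
    by_cases h : x ∈ t
    · rw [if_pos h]
      refine ih.imp_of_mem ?_
      intro a b ha hb hab
      have ha' := (PySem.Set.mem_ofList _ _).1 ha
      have hb' := (PySem.Set.mem_ofList _ _).1 hb
      rw [List.idxOf_append_of_mem ha', List.idxOf_append_of_mem hb']
      exact hab
    · rw [if_neg h]
      rw [List.pairwise_append]
      refine ⟨ih.imp_of_mem ?_, List.pairwise_singleton _ _, ?_⟩
      · intro a b ha hb hab
        have ha' := (PySem.Set.mem_ofList _ _).1 ha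
        have hb' := (PySem.Set.mem_ofList _ _).1 hb
        rw [List.idxOf_append_of_mem ha', List.idxOf_append_of_mem hb']
        exact hab
      · intro a ha b hb
        have ha' := (PySem.Set.mem_ofList _ _).1 ha
        have hb' : b = x := by simpa using hb
        subst hb'
        rw [List.idxOf_append_of_mem ha', pvIdx_append_not_mem t b h]
        have := List.idxOf_lt_length_of_mem ha'
        omega

-- the backward-overwrite dict holds each distinct word with its first-occurrence index
theorem pvItems_first_pos (words : List String) :
    ((PySem.List.enumerate words).reverse.foldl (fun d p => d.insert p.2 p.1)
        PySem.Dict.empty).items =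
      (PySem.Set.ofList words.reverse).map (fun w => (w, (words.idxOf w : Int))) := by
  set d := (PySem.List.enumerate words).reverse.foldl (fun d p => d.insert p.2 p.1)
    PySem.Dict.empty with hd
  have hkeys : d.keys = PySem.Set.ofList words.reverse := by
    rw [hd, PySem.Dict.keys_foldl_insert_key ((PySem.List.enumerate words).reverse)
      Prod.snd (fun d p => p.1) PySem.Dict.empty]
    rw [PySem.Dict.keys_empty]
    have : (PySem.List.enumerate words).reverse.map Prod.snd = words.reverse := by
      rw [List.map_reverse]
      congr 1
      exact pvEnum_snd words 0
    rw [this]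
    rfl
  have hnd : d.keys.Nodup := by
    rw [hkeys]; exact PySem.Set.nodup_ofList _
  rw [PySem.Dict.items_eq_map_keys d hnd 0, hkeys]
  apply List.map_congr_left
  intro w hw
  have hwmem : w ∈ words := by
    have := (PySem.Set.mem_ofList _ _).1 hw
    simpa using this
  have hget : d.get? w = some ((words.idxOf w : Int)) := by
    rw [hd, pvGetFold, List.reverse_reverse, pvFindEnum words 0 w hwmem]
    simp
  rw [Prod.mk.injEq]
  exact ⟨rfl, PySem.Dict.getD_of_get?_eq_some _ _ hget⟩

-- sorting the recorded pairs by index reproduces the first-occurrence distinct list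
theorem pvPairs_eq (words : List String) :
    PySem.List.sorted ((PySem.List.enumerate words).reverse.foldl
        (fun d p => d.insert p.2 p.1) PySem.Dict.empty).items (fun p => p.2) false =
      (PySem.Set.ofList words).map (fun w => (w, (words.idxOf w : Int))) := by
  apply PySem.List.sorted_eq_of_perm_of_pairwise_lt
  · rw [pvItems_first_pos]
    apply List.Perm.map
    rw [List.perm_ext_iff_of_nodup (PySem.Set.nodup_ofList _) (PySem.Set.nodup_ofList _)]
    intro a
    rw [PySem.Set.mem_ofList, PySem.Set.mem_ofList, List.mem_reverse]
  · rw [List.pairwise_map]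
    exact pvPairwiseIdx words

-- A's counter/enumerate pipeline produces the enumeration of the first-occurrence distinct words
theorem pvA_snd (words : List String) :
    ((PySem.List.enumerate ((PySem.Dict.counter words).keys.map
        (fun val => ((PySem.Dict.counter words).getD val 0, val)))).map (fun p => (p.1, p.2.2))) =
      PySem.List.enumerate (PySem.Set.ofList words) := by
  rw [PySem.Dict.keys_counter]
  have : (PySem.Set.ofList words).map (fun val => ((PySem.Dict.counter words).getD val 0, val)) =
      (PySem.Set.ofList words).map (fun val => (((words.count val : Int)), val)) := by
    apply List.map_congr_left
    intro v _
    simp [PySem.Dict.getD_counter]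
  rw [this, pvEnum_map_pair]

theorem pvA_eq (words : List String) :
    create_lookup_tables words =
      ((PySem.List.enumerate (PySem.Set.ofList words)).map (fun p => (p.2, p.1)),
       PySem.List.enumerate (PySem.Set.ofList words)) := by
  unfold create_lookup_tables
  set C : List (Int × String) := PySem.List.enumerate (PySem.Set.ofList words) with hC
  set d2 : PySem.Dict Int String := PySem.Dict.ofList ((PySem.List.enumerate
      ((PySem.Dict.counter words).keys.map
        (fun val => ((PySem.Dict.counter words).getD val 0, val)))).map (fun p => (p.1, p.2.2))) with hd2
  have hA2 : d2.items = C := by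
    rw [hd2, pvA_snd]
    exact pvItems_ofList _ (pvEnum_fst_nodup _ _)
  have hnd2 : d2.keys.Nodup := by
    show (d2.items.map Prod.fst).Nodup
    rw [hA2, hC]
    exact pvEnum_fst_nodup _ _
  have hmapkeys : d2.keys.map (fun k => (d2.getD k "", k)) = d2.items.map (fun p => (p.2, p.1)) := by
    rw [PySem.Dict.items_eq_map_keys d2 hnd2 ""]
    simp
  rw [Prod.mk.injEq]
  refine ⟨?_, hA2⟩
  rw [hmapkeys, hA2]
  have hswap : ((C.map (fun p => (p.2, p.1))).map Prod.fst).Nodup := by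
    have : (C.map (fun p => (p.2, p.1))).map Prod.fst = C.map Prod.snd := by simp
    rw [this, hC, pvEnum_snd]
    exact PySem.Set.nodup_ofList words
  exact pvItems_ofList _ hswap

theorem pvB_eq (words : List String) :
    create_lookup_tables_alt words =
      ((PySem.List.enumerate (PySem.Set.ofList words)).map (fun p => (p.2, p.1)),
       PySem.List.enumerate (PySem.Set.ofList words)) := by
  simp only [create_lookup_tables_alt]
  rw [pvPairs_eq]
  have hvocab : ((PySem.Set.ofList words).map (fun w => (w, (words.idxOf w : Int)))).map
      (fun p => p.1) = PySem.Set.ofList words := by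
    simp [Function.comp_def]
  rw [hvocab]
  set C : List (Int × String) := PySem.List.enumerate (PySem.Set.ofList words) with hC
  rw [Prod.mk.injEq]
  constructor
  · apply pvItems_ofList
    have : ((C.map (fun q => (q.2, q.1))).map Prod.fst) = C.map Prod.snd := by simp
    rw [this, hC, pvEnum_snd]
    exact PySem.Set.nodup_ofList words
  · exact pvItems_ofList _ (pvEnum_fst_nodup _ _)

-- ===== VERDICT (by name: the statement is the Claim_ definition above) =====
theorem create_lookup_tables_spec : Claim_equal_create_lookup_tables := by
  intro words _
  unfold Spec_create_lookup_tables
  rw [pvA_eq, pvB_eq]
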